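-- pv_equiv track=rewrite | github.com/zhengweix/leetcode2 | oa.numberBanners.py | numberBanners
-- ===== SOURCE A (Python) =====
-- def numberBanners(sizes, prices, requestedSize):
--     mp = []
--     for i, s in enumerate(requestedSize):
--         mp.append([prices[i], s % 10, s // 10])
--     ans = 0
--     for price, size, qty in sorted(mp, reverse=True):
--         if sizes[size] > 0:
--             qty = min(sizes[size], qty)
--             ans += price * qty
--             sizes[size] -= qty
--     return ans
-- ===== SOURCE B (Python) =====
-- def numberBanners(sizes, prices, requestedSize):
--     # Per-inventory-slot pass instead of one global sort: for each slot (s % 10 is always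
--     # 0..9), gather its requests, sort them by price (then quantity) descending, allocate.
--     # Like the original, this mutates the passed-in sizes list.
--     ans = 0
--     for size in range(min(len(sizes), 10)):
--         remaining = sizes[size]
--         reqs = sorted(((prices[i], s // 10) for i, s in enumerate(requestedSize) if s % 10 == size), reverse=True)
--         for price, qty in reqs:
--             if remaining > 0:
--                 take = min(remaining, qty)
--                 ans += price * take
--                 remaining -= take
--         sizes[size] = remaining
--     return ans
-- ===== Notes on version B (the rewrite author's own statement) =====
-- stated objective: alternative
-- what changed: Replaces A's build-all-triples + one global descending sort + single allocation sweep by a per-inventory-slot pass: for each slot index, gather that slot's (price, qty) requests, sort just that bucket by price (then qty) descending, and allocate against a local 'remaining' counter instead of repeatedly indexing the sizes list.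
import Mathlib
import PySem

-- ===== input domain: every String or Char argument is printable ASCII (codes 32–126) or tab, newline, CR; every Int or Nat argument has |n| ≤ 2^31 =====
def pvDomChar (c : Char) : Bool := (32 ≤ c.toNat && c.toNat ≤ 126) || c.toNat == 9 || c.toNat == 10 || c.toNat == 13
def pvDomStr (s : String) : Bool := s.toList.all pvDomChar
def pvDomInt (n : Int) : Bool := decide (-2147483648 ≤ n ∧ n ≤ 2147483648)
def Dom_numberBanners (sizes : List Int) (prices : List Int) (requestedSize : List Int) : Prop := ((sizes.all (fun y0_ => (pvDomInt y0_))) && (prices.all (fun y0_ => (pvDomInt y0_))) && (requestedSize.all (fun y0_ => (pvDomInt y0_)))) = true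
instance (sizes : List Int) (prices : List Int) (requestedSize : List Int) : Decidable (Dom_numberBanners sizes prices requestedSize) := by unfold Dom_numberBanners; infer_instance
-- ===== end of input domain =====

-- B replaces A's single global sort with a per-inventory-slot pass (gather each slot's
-- requests, sort that bucket, allocate); objective: alternative algorithm of similar cost.
-- Both A and B mutate the caller's `sizes` list in the same way; the theorems below are
-- about the return value.

-- ===== PORT A =====
-- Python compares the 3-element lists [price, size, qty] lexicographically.  On the
-- stated domain the components are bounded (|price| ≤ 2^31, 0 ≤ size < 10, |qty| ≤ 2^31),
-- so the injective encoding price·2^50 + size·2^40 + qty is strictly monotone for that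
-- lexicographic order and `sorted` with this Int key yields exactly Python's order
-- (ties under the key are identical triples, so stability cannot matter).
def pvEnc3 (t : Int × Int × Int) : Int := t.1 * 1125899906842624 + t.2.1 * 1099511627776 + t.2.2

-- the body of A's allocation loop: state = (ans, sizes); one triple (price, size, qty)
def pvStepA (st : Int × List Int) (t : Int × Int × Int) : Int × List Int :=
  if PySem.List.pyGetD st.2 t.2.1 0 > 0 then
    (st.1 + t.1 * min (PySem.List.pyGetD st.2 t.2.1 0) t.2.2,
     PySem.List.pySetD st.2 t.2.1 (PySem.List.pyGetD st.2 t.2.1 0 - min (PySem.List.pyGetD st.2 t.2.1 0) t.2.2))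
  else st

def numberBanners (sizes : List Int) (prices : List Int) (requestedSize : List Int) : Int :=
  let mp := (PySem.List.enumerate requestedSize 0).foldl
    (fun acc is => acc ++ [(PySem.List.pyGetD prices is.1 0, PySem.Int.mod is.2 10, PySem.Int.floordiv is.2 10)]) []
  ((PySem.List.sorted mp pvEnc3 true).foldl pvStepA (0, sizes)).1

-- ===== PORT B =====
-- pairs (price, qty) are compared lexicographically; same bounded-injective encoding
def pvEnc2 (pq : Int × Int) : Int := pq.1 * 1099511627776 + pq.2

-- the body of B's inner loop: state = (ans, remaining); one pair (price, qty)
def pvStepIn (ar : Int × Int) (pq : Int × Int) : Int × Int :=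
  if ar.2 > 0 then (ar.1 + pq.1 * min ar.2 pq.2, ar.2 - min ar.2 pq.2) else ar

-- the generator expression: requests falling in slot k, in order
def pvBucket (prices : List Int) (requestedSize : List Int) (k : Int) : List (Int × Int) :=
  (PySem.List.enumerate requestedSize 0).foldl
    (fun acc is => if PySem.Int.mod is.2 10 = k then
        acc ++ [(PySem.List.pyGetD prices is.1 0, PySem.Int.floordiv is.2 10)]
      else acc) []

-- the body of B's outer loop: state = (ans, sizes); one slot index k
def pvStepOut (prices : List Int) (requestedSize : List Int) (st : Int × List Int) (k : Int) : Int × List Int :=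
  let inner := (PySem.List.sorted (pvBucket prices requestedSize k) pvEnc2 true).foldl
    pvStepIn (st.1, PySem.List.pyGetD st.2 k 0)
  (inner.1, PySem.List.pySetD st.2 k inner.2)

def numberBanners_alt (sizes : List Int) (prices : List Int) (requestedSize : List Int) : Int :=
  ((PySem.List.pyRange 0 ((min sizes.length 10 : Nat) : Int) 1).foldl (pvStepOut prices requestedSize) (0, sizes)).1

-- ===== PRECONDITION & SPEC =====
-- Pre_ excludes exactly the inputs on which A raises IndexError: a request whose slot
-- s % 10 is outside `sizes`, or fewer prices than requests.
def Pre_numberBanners (sizes : List Int) (prices : List Int) (requestedSize : List Int) : Prop :=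
  requestedSize.length ≤ prices.length ∧
    ∀ s ∈ requestedSize, (PySem.Int.mod s 10).toNat < sizes.length

instance (sizes : List Int) (prices : List Int) (requestedSize : List Int) : Decidable (Pre_numberBanners sizes prices requestedSize) := by unfold Pre_numberBanners; infer_instance

def pvWitness_numberBanners : List Int × List Int × List Int := ([1, 2], [5, 7], [21, 30])

def Spec_numberBanners (sizes : List Int) (prices : List Int) (requestedSize : List Int) (out : Int) : Prop := out = numberBanners_alt sizes prices requestedSize
instance (sizes : List Int) (prices : List Int) (requestedSize : List Int) (out : Int) : Decidable (Spec_numberBanners sizes prices requestedSize out) := by unfold Spec_numberBanners; infer_instance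

-- ===== CLAIM (what is proved, stated in full; the proofs are below) =====
def Claim_equal_numberBanners : Prop := ∀ (sizes : List Int) (prices : List Int) (requestedSize : List Int), Dom_numberBanners sizes prices requestedSize → Pre_numberBanners sizes prices requestedSize → Spec_numberBanners sizes prices requestedSize (numberBanners sizes prices requestedSize)

-- ===== LEMMAS AND PROOFS =====

-- proof-side vocabulary
def pvTriple (prices : List Int) (is : Int × Int) : Int × Int × Int :=
  (PySem.List.pyGetD prices is.1 0, PySem.Int.mod is.2 10, PySem.Int.floordiv is.2 10)

def pvProj (t : Int × Int × Int) : Int × Int := (t.1, t.2.2)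

def pvMp (prices : List Int) (requestedSize : List Int) : List (Int × Int × Int) :=
  (PySem.List.enumerate requestedSize 0).map (pvTriple prices)

def pvBound (x : Int) : Prop := -2147483648 ≤ x ∧ x ≤ 2147483648

def pvGood (t : Int × Int × Int) : Prop := pvBound t.1 ∧ 0 ≤ t.2.1 ∧ t.2.1 < 10 ∧ pvBound t.2.2

-- A's loop as a pure recursion returning the gain
def pvAllocA : List Int → List (Int × Int × Int) → Int
  | _, [] => 0
  | sz, t :: r =>
    if PySem.List.pyGetD sz t.2.1 0 > 0 then
      t.1 * min (PySem.List.pyGetD sz t.2.1 0) t.2.2 +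
        pvAllocA (PySem.List.pySetD sz t.2.1
          (PySem.List.pyGetD sz t.2.1 0 - min (PySem.List.pyGetD sz t.2.1 0) t.2.2)) r
    else pvAllocA sz r

-- B's inner loop as a pure recursion: (gain, final remaining)
def pvAlloc2 : Int → List (Int × Int) → Int × Int
  | cap, [] => (0, cap)
  | cap, pq :: r =>
    if cap > 0 then
      ((pvAlloc2 (cap - min cap pq.2) r).1 + pq.1 * min cap pq.2, (pvAlloc2 (cap - min cap pq.2) r).2)
    else pvAlloc2 cap r

theorem pv_getD_setD_ne (sz : List Int) (k j v : Int) (hk0 : 0 ≤ k) (hj0 : 0 ≤ j)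
    (hjl : j < (sz.length : Int)) (hne : j ≠ k) :
    PySem.List.pyGetD (PySem.List.pySetD sz k v) j 0 = PySem.List.pyGetD sz j 0 := by
  rw [PySem.List.pySetD_of_nonneg _ _ hk0,
    PySem.List.pyGetD_eq_getElem _ _ hj0 (by simp; omega),
    PySem.List.pyGetD_eq_getElem _ _ hj0 hjl,
    List.getElem_set_ne (by omega)]

theorem pv_getD_setD_self (sz : List Int) (k v : Int) (hk0 : 0 ≤ k)
    (hkl : k < (sz.length : Int)) :
    PySem.List.pyGetD (PySem.List.pySetD sz k v) k 0 = v := by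
  rw [PySem.List.pySetD_of_nonneg _ _ hk0,
    PySem.List.pyGetD_eq_getElem _ _ hk0 (by simp; omega),
    List.getElem_set_self]

theorem pv_foldA (L : List (Int × Int × Int)) : ∀ (a : Int) (sz : List Int),
    (L.foldl pvStepA (a, sz)).1 = a + pvAllocA sz L := by
  induction L with
  | nil => intro a sz; simp [pvAllocA]
  | cons t r ih =>
    intro a sz
    simp only [List.foldl_cons, pvStepA, pvAllocA]
    split_ifs with h
    · rw [ih]; ring
    · rw [ih]

theorem pv_foldIn (L : List (Int × Int)) : ∀ (a cap : Int),
    L.foldl pvStepIn (a, cap) = (a + (pvAlloc2 cap L).1, (pvAlloc2 cap L).2) := by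
  induction L with
  | nil => intro a cap; simp [pvAlloc2]
  | cons pq r ih =>
    intro a cap
    simp only [List.foldl_cons, pvStepIn, pvAlloc2]
    split_ifs with h
    · rw [ih]; congr 1; ring
    · exact ih a cap

theorem pv_map_sum_congr (ks : List Int) (f g : Int → Int) (h : ∀ j ∈ ks, f j = g j) :
    (ks.map f).sum = (ks.map g).sum := by
  rw [List.map_congr_left h]

theorem pv_sum_split (ks : List Int) (f g : Int → Int) (k c : Int)
    (hnd : ks.Nodup) (hk : k ∈ ks) (hfg : ∀ j ∈ ks, j ≠ k → f j = g j) (hfk : f k = c + g k) :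
    (ks.map f).sum = c + (ks.map g).sum := by
  induction ks with
  | nil => cases hk
  | cons j t ih =>
    rcases List.nodup_cons.mp hnd with ⟨hj, hnd'⟩
    simp only [List.map_cons, List.sum_cons]
    rcases List.mem_cons.mp hk with rfl | hk'
    · have ht : (t.map f).sum = (t.map g).sum :=
        pv_map_sum_congr t f g (fun x hx => hfg x (List.mem_cons_of_mem _ hx)
          (by rintro rfl; exact hj hx))
      rw [hfk, ht]; ring
    · have hj' : j ≠ k := by rintro rfl; exact hj hk'
      rw [hfg j List.mem_cons_self hj',
        ih hnd' hk' (fun x hx hxk => hfg x (List.mem_cons_of_mem _ hx) hxk)]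
      ring

theorem pv_pyRange_nodup (n : Nat) : (PySem.List.pyRange 0 n 1).Nodup := by
  rw [PySem.List.pyRange_zero_natCast]
  exact List.Nodup.map (fun a b h => by exact_mod_cast h) List.nodup_range

-- summands that vanish above slot 9 let the range be truncated at 10
theorem pv_sum_range_trunc (n : Nat) (f : Int → Int) (h0 : ∀ k : Int, (10 : Int) ≤ k → f k = 0) :
    ((PySem.List.pyRange 0 n 1).map f).sum
      = ((PySem.List.pyRange 0 (min n 10 : Nat) 1).map f).sum := by
  by_cases h : n ≤ 10
  · rw [Nat.min_eq_left h]
  · rw [Nat.min_eq_right (by omega : 10 ≤ n),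
      PySem.List.pyRange_one_append 0 10 n (by omega) (by omega),
      List.map_append, List.sum_append,
      pv_map_sum_congr (PySem.List.pyRange 10 n 1) f (fun _ => (0 : Int))
        (fun j hj => h0 j (PySem.List.mem_pyRange_one.mp hj).1)]
    simp

-- the heart of the proof: A's single sorted pass decomposes per inventory slot
theorem pv_allocA_eq_sum (L : List (Int × Int × Int)) : ∀ (sz : List Int),
    (∀ t ∈ L, 0 ≤ t.2.1 ∧ t.2.1 < (sz.length : Int)) →
    pvAllocA sz L = ((PySem.List.pyRange 0 sz.length 1).map
      (fun k => (pvAlloc2 (PySem.List.pyGetD sz k 0)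
        ((L.filter (fun t => decide (t.2.1 = k))).map pvProj)).1)).sum := by
  induction L with
  | nil =>
    intro sz _
    rw [pv_map_sum_congr _ _ (fun _ => (0 : Int)) (by intro j _; simp [pvAlloc2])]
    simp [pvAllocA]
  | cons t r ih =>
    intro sz hb
    obtain ⟨hk0, hkl⟩ := hb t List.mem_cons_self
    have hbr : ∀ x ∈ r, 0 ≤ x.2.1 ∧ x.2.1 < (sz.length : Int) :=
      fun x hx => hb x (List.mem_cons_of_mem _ hx)
    have hkmem : t.2.1 ∈ PySem.List.pyRange 0 sz.length 1 :=
      PySem.List.mem_pyRange_one.mpr ⟨hk0, hkl⟩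
    by_cases h : PySem.List.pyGetD sz t.2.1 0 > 0
    · have hAl : pvAllocA sz (t :: r) = t.1 * min (PySem.List.pyGetD sz t.2.1 0) t.2.2 +
          pvAllocA (PySem.List.pySetD sz t.2.1
            (PySem.List.pyGetD sz t.2.1 0 - min (PySem.List.pyGetD sz t.2.1 0) t.2.2)) r := by
        simp only [pvAllocA]; rw [if_pos h]
      set tk := min (PySem.List.pyGetD sz t.2.1 0) t.2.2 with htk
      set sz' := PySem.List.pySetD sz t.2.1 (PySem.List.pyGetD sz t.2.1 0 - tk) with hsz'
      have hlen : sz'.length = sz.length := PySem.List.length_pySetD sz _ _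
      rw [hAl, ih sz' (by rw [hlen]; exact hbr), hlen]
      symm
      refine pv_sum_split _ _ _ t.2.1 (t.1 * tk) (pv_pyRange_nodup _) hkmem ?_ ?_
      · intro j hj hne
        have hjb := PySem.List.mem_pyRange_one.mp hj
        have hfil : (t :: r).filter (fun x => decide (x.2.1 = j))
            = r.filter (fun x => decide (x.2.1 = j)) := by
          simp [Ne.symm hne]
        rw [hfil, pv_getD_setD_ne sz t.2.1 j _ hk0 hjb.1 hjb.2 hne]
      · have hfil : (t :: r).filter (fun x => decide (x.2.1 = t.2.1))
            = t :: r.filter (fun x => decide (x.2.1 = t.2.1)) := by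
          simp
        rw [hfil, pv_getD_setD_self sz t.2.1 _ hk0 hkl]
        simp only [List.map_cons, pvAlloc2, pvProj]
        rw [if_pos h]
        ring
    · have hAl : pvAllocA sz (t :: r) = pvAllocA sz r := by
        simp only [pvAllocA]; rw [if_neg h]
      rw [hAl, ih sz hbr]
      refine pv_map_sum_congr _ _ _ ?_
      intro j hj
      by_cases hje : t.2.1 = j
      · subst hje
        have hfil : (t :: r).filter (fun x => decide (x.2.1 = t.2.1))
            = t :: r.filter (fun x => decide (x.2.1 = t.2.1)) := by
          simp
        rw [hfil]
        simp only [List.map_cons, pvAlloc2, pvProj]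
        rw [if_neg h]
      · have hfil : (t :: r).filter (fun x => decide (x.2.1 = j))
            = r.filter (fun x => decide (x.2.1 = j)) := by
          simp [hje]
        rw [hfil]

-- B's outer loop, over distinct in-range slots, is a sum of independent per-slot gains
theorem pv_foldB (prices requestedSize : List Int) (ks : List Int) : ∀ (a : Int) (sz : List Int),
    ks.Nodup → (∀ k ∈ ks, 0 ≤ k ∧ k < (sz.length : Int)) →
    ((ks.foldl (pvStepOut prices requestedSize) (a, sz)).1)
      = a + (ks.map (fun k => (pvAlloc2 (PySem.List.pyGetD sz k 0)
          (PySem.List.sorted (pvBucket prices requestedSize k) pvEnc2 true)).1)).sum := by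
  induction ks with
  | nil => intro a sz _ _; simp
  | cons k t ih =>
    intro a sz hnd hb
    rcases List.nodup_cons.mp hnd with ⟨hkt, hnd'⟩
    obtain ⟨hk0, hkl⟩ := hb k List.mem_cons_self
    simp only [List.foldl_cons, List.map_cons, List.sum_cons]
    rw [show pvStepOut prices requestedSize (a, sz) k
        = (a + (pvAlloc2 (PySem.List.pyGetD sz k 0)
            (PySem.List.sorted (pvBucket prices requestedSize k) pvEnc2 true)).1,
           PySem.List.pySetD sz k (pvAlloc2 (PySem.List.pyGetD sz k 0)
            (PySem.List.sorted (pvBucket prices requestedSize k) pvEnc2 true)).2) from by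
      simp only [pvStepOut]; rw [pv_foldIn]]
    rw [ih _ _ hnd' (by
      intro j hj
      obtain ⟨hj0, hjl⟩ := hb j (List.mem_cons_of_mem _ hj)
      rw [PySem.List.length_pySetD]
      exact ⟨hj0, hjl⟩)]
    rw [pv_map_sum_congr _ _ (fun j => (pvAlloc2 (PySem.List.pyGetD sz j 0)
          (PySem.List.sorted (pvBucket prices requestedSize j) pvEnc2 true)).1) (by
      intro j hj
      obtain ⟨hj0, hjl⟩ := hb j (List.mem_cons_of_mem _ hj)
      have hne : j ≠ k := by rintro rfl; exact hkt hj
      rw [pv_getD_setD_ne sz k j _ hk0 hj0 hjl hne])]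
    ring

theorem pv_bucket_aux (prices : List Int) (k : Int) (l : List (Int × Int)) : ∀ acc,
    l.foldl (fun acc is => if PySem.Int.mod is.2 10 = k then
        acc ++ [(PySem.List.pyGetD prices is.1 0, PySem.Int.floordiv is.2 10)]
      else acc) acc
    = acc ++ (l.filter (fun is => decide (PySem.Int.mod is.2 10 = k))).map
        (fun is => (PySem.List.pyGetD prices is.1 0, PySem.Int.floordiv is.2 10)) := by
  induction l with
  | nil => intro acc; simp
  | cons x tl ih =>
    intro acc
    simp only [List.foldl_cons, List.filter_cons]
    by_cases h : PySem.Int.mod x.2 10 = k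
    · rw [if_pos h, ih, if_pos (by rw [decide_eq_true_eq]; exact h)]
      simp
    · rw [if_neg h, ih, if_neg (by rw [decide_eq_true_eq]; exact h)]

theorem pv_bucket_eq (prices requestedSize : List Int) (k : Int) :
    pvBucket prices requestedSize k
      = ((pvMp prices requestedSize).filter (fun t => decide (t.2.1 = k))).map pvProj := by
  unfold pvBucket pvMp
  rw [pv_bucket_aux, List.filter_map, List.map_map, List.nil_append]
  rfl

theorem pv_mp_good (sizes prices requestedSize : List Int)
    (hd : Dom_numberBanners sizes prices requestedSize) :
    ∀ t ∈ pvMp prices requestedSize, pvGood t := by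
  intro t ht
  unfold Dom_numberBanners at hd
  simp only [Bool.and_eq_true, List.all_eq_true, pvDomInt, decide_eq_true_eq] at hd
  obtain ⟨⟨hds, hdp⟩, hdr⟩ := hd
  rcases List.mem_map.mp ht with ⟨is, his, rfl⟩
  have hs : is.2 ∈ requestedSize := by
    have h2 := List.mem_map_of_mem (f := fun x : Int × Int => x.2) his
    rwa [PySem.List.map_snd_enumerate] at h2
  have hsb := hdr is.2 hs
  unfold pvGood pvTriple pvBound
  dsimp only
  refine ⟨?_, PySem.Int.mod_nonneg is.2 (by norm_num),
    PySem.Int.mod_lt is.2 (by norm_num), ?_⟩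
  · by_cases hr : PySem.Raise.InRange prices.length is.1
    · exact hdp _ (PySem.List.pyGetD_mem prices (0 : Int) hr)
    · rw [PySem.List.pyGetD_of_none prices is.1 0 ((PySem.List.pyGet?_eq_none_iff _ _).mpr hr)]
      exact ⟨by norm_num, by norm_num⟩
  · have hfd := PySem.Int.floordiv_mul_add_mod is.2 10
    have h0 := PySem.Int.mod_nonneg is.2 (b := 10) (by norm_num)
    have h1 := PySem.Int.mod_lt is.2 (b := 10) (by norm_num)
    constructor <;> omega

theorem pv_mp_size_lt (sizes prices requestedSize : List Int)
    (hpre : Pre_numberBanners sizes prices requestedSize) :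
    ∀ t ∈ pvMp prices requestedSize, t.2.1 < (sizes.length : Int) := by
  intro t ht
  rcases List.mem_map.mp ht with ⟨is, his, rfl⟩
  have hs : is.2 ∈ requestedSize := by
    have h2 := List.mem_map_of_mem (f := fun x : Int × Int => x.2) his
    rwa [PySem.List.map_snd_enumerate] at h2
  have h := hpre.2 is.2 hs
  have h0 := PySem.Int.mod_nonneg is.2 (b := 10) (by norm_num)
  unfold pvTriple
  simp only
  omega

theorem pv_enc2_antisymm (p q : Int × Int)
    (hp1 : pvBound p.1) (hp2 : pvBound p.2) (hq1 : pvBound q.1) (hq2 : pvBound q.2)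
    (h1 : pvEnc2 q ≤ pvEnc2 p) (h2 : pvEnc2 p ≤ pvEnc2 q) : p = q := by
  obtain ⟨a, b⟩ := p
  obtain ⟨c, d⟩ := q
  unfold pvBound at hp1 hp2 hq1 hq2
  unfold pvEnc2 at h1 h2
  simp only at hp1 hp2 hq1 hq2 h1 h2
  refine Prod.ext ?_ ?_ <;> simp only <;> omega

theorem pv_enc3_to_enc2 (a b : Int × Int × Int) (ha : pvGood a) (hb : pvGood b)
    (hk : a.2.1 = b.2.1) (h : pvEnc3 b ≤ pvEnc3 a) : pvEnc2 (pvProj b) ≤ pvEnc2 (pvProj a) := by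
  obtain ⟨a1, a2, a3⟩ := a
  obtain ⟨b1, b2, b3⟩ := b
  unfold pvGood pvBound at ha hb
  unfold pvEnc3 at h
  unfold pvEnc2 pvProj
  simp only at ha hb hk h ⊢
  omega

-- the filtered global sort IS the sorted bucket
theorem pv_sorted_filter (sizes prices requestedSize : List Int)
    (hd : Dom_numberBanners sizes prices requestedSize) (k : Int) :
    ((PySem.List.sorted (pvMp prices requestedSize) pvEnc3 true).filter
        (fun t => decide (t.2.1 = k))).map pvProj
      = PySem.List.sorted
          (((pvMp prices requestedSize).filter (fun t => decide (t.2.1 = k))).map pvProj)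
          pvEnc2 true := by
  have hgood := pv_mp_good sizes prices requestedSize hd
  have hmem1 : ∀ x ∈ ((PySem.List.sorted (pvMp prices requestedSize) pvEnc3 true).filter
      (fun t => decide (t.2.1 = k))).map pvProj, ∃ t, pvGood t ∧ pvProj t = x := by
    intro x hx
    rcases List.mem_map.mp hx with ⟨t, ht, rfl⟩
    have := (List.mem_filter.mp ht).1
    exact ⟨t, hgood t ((PySem.List.mem_sorted _ _ _ _).mp this), rfl⟩
  have hmem2 : ∀ x ∈ PySem.List.sorted
      (((pvMp prices requestedSize).filter (fun t => decide (t.2.1 = k))).map pvProj)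
      pvEnc2 true, ∃ t, pvGood t ∧ pvProj t = x := by
    intro x hx
    have := (PySem.List.mem_sorted _ _ _ _).mp hx
    rcases List.mem_map.mp this with ⟨t, ht, rfl⟩
    exact ⟨t, hgood t (List.mem_filter.mp ht).1, rfl⟩
  refine List.Perm.eq_of_pairwise (le := fun a b => pvEnc2 b ≤ pvEnc2 a) ?_ ?_ ?_ ?_
  · intro a b ha hb hle hge
    rcases hmem1 a ha with ⟨ta, hta, rfl⟩
    rcases hmem2 b hb with ⟨tb, htb, rfl⟩
    exact pv_enc2_antisymm _ _ hta.1 hta.2.2.2 htb.1 htb.2.2.2 hle hge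
  · refine List.pairwise_map.mpr ?_
    have h1 := PySem.List.sorted_pairwise_rev (pvMp prices requestedSize) pvEnc3
    have h2 := List.Pairwise.sublist
      (List.filter_sublist (p := fun t : Int × Int × Int => decide (t.2.1 = k))) h1
    refine List.Pairwise.imp_of_mem ?_ h2
    intro a b ha hb hr
    have hak := List.of_mem_filter ha
    have hbk := List.of_mem_filter hb
    simp only [decide_eq_true_eq] at hak hbk
    have hga := hgood a ((PySem.List.mem_sorted _ _ _ _).mp (List.mem_filter.mp ha).1)
    have hgb := hgood b ((PySem.List.mem_sorted _ _ _ _).mp (List.mem_filter.mp hb).1)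
    exact pv_enc3_to_enc2 a b hga hgb (hak.trans hbk.symm) hr
  · exact PySem.List.sorted_pairwise_rev _ _
  · have pmM : (PySem.List.sorted (pvMp prices requestedSize) pvEnc3 true).Perm
        (pvMp prices requestedSize) := PySem.List.sorted_perm _ _ _
    have h1 := (pmM.filter (fun t => decide (t.2.1 = k))).map pvProj
    have h2 : (PySem.List.sorted
        (((pvMp prices requestedSize).filter (fun t => decide (t.2.1 = k))).map pvProj)
        pvEnc2 true).Perm
        (((pvMp prices requestedSize).filter (fun t => decide (t.2.1 = k))).map pvProj) :=
      PySem.List.sorted_perm _ _ _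
    exact h1.trans h2.symm

-- ===== VERDICT (by name: the statement is the Claim_ definition above) =====
theorem numberBanners_spec : Claim_equal_numberBanners := by
  intro sizes prices requestedSize hd hpre
  unfold Spec_numberBanners numberBanners numberBanners_alt
  simp only [PySem.List.foldl_append_singleton_eq_map, List.nil_append]
  rw [show (PySem.List.enumerate requestedSize 0).map
      (fun is => (PySem.List.pyGetD prices is.1 0, PySem.Int.mod is.2 10,
        PySem.Int.floordiv is.2 10)) = pvMp prices requestedSize from rfl]
  rw [pv_foldA]
  rw [pv_allocA_eq_sum _ sizes (by
    intro t ht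
    have htm := (PySem.List.mem_sorted _ _ _ _).mp ht
    exact ⟨(pv_mp_good sizes prices requestedSize hd t htm).2.1,
      pv_mp_size_lt sizes prices requestedSize hpre t htm⟩)]
  rw [pv_sum_range_trunc sizes.length _ (by
    intro k hk10
    have hfil : (PySem.List.sorted (pvMp prices requestedSize) pvEnc3 true).filter
        (fun t => decide (t.2.1 = k)) = [] := by
      rw [List.filter_eq_nil_iff]
      intro t ht
      have hg := pv_mp_good sizes prices requestedSize hd t
        ((PySem.List.mem_sorted _ _ _ _).mp ht)
      simp only [decide_eq_true_eq]
      have := hg.2.2.1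
      omega
    rw [hfil]
    simp [pvAlloc2])]
  rw [pv_foldB prices requestedSize _ 0 sizes (pv_pyRange_nodup _) (by
    intro k hk
    have h1 := PySem.List.mem_pyRange_one.mp hk
    refine ⟨h1.1, ?_⟩
    have := h1.2
    push_cast at this ⊢
    omega)]
  rw [zero_add, zero_add]
  refine pv_map_sum_congr _ _ _ ?_
  intro j _
  rw [pv_bucket_eq, pv_sorted_filter sizes prices requestedSize hd]
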